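-- pv_equiv track=rewrite | github.com/elbyswim/leetcode | Leetcode/Weekly 239.py | minInterval
-- ===== SOURCE A (Python) =====
-- def minInterval(intervals, queries):
--     min_intervals = {}
--     for interval in intervals:
--         size = interval[1] - interval[0] + 1
--         for i in range(interval[0], interval[1] + 1):
--             if i in min_intervals:
--                 min_intervals[i] = min(min_intervals[i], size)
--             else:
--                 min_intervals[i] = size
--     for i in range(len(queries)):
--         queries[i] = min_intervals[queries[i]] if queries[i] in min_intervals else -1
--     return queries
--
-- intervals = []
--
-- queries = [2,3,4,5]
-- ===== SOURCE B (Python) =====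
-- # B: answers each query by a direct scan over the intervals (no per-point dict);
-- # returns a new list (A also mutates `queries` in place; the equivalence is about the return value).
-- def minInterval(intervals, queries):
--     res = []
--     for q in queries:
--         best = None
--         for iv in intervals:
--             if iv[0] <= q <= iv[1]:
--                 size = iv[1] - iv[0] + 1
--                 if best is None or size < best:
--                     best = size
--         res.append(best if best is not None else -1)
--     return res
-- ===== Notes on version B (the rewrite author's own statement) =====
-- stated objective: alternative
-- what changed: B drops A's dictionary that enumerates every integer point of every interval and instead scans the interval list once per query, keeping the minimum size of the intervals that contain it.
import Mathlib
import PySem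

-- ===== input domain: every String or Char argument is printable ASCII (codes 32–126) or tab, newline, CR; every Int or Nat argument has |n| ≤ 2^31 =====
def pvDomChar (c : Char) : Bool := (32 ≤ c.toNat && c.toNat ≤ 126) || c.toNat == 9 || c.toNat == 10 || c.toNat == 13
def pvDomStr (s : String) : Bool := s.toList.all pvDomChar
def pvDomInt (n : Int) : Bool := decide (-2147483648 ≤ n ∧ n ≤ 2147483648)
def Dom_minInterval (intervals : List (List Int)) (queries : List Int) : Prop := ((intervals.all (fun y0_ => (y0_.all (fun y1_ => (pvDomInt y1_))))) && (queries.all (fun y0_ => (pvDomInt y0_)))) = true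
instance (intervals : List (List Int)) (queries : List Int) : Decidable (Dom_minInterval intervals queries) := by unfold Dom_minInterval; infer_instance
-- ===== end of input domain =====

-- B replaces A's per-point dictionary with a per-query scan over the intervals (alternative
-- algorithm, same return value).  A also mutates `queries` in place; B returns a fresh list —
-- the equivalence proved here is about the return value only.

-- ===== PORT A =====
-- A's final loop `for i in range(len(queries)): queries[i] = …` rewrites each slot from its own
-- old value once, so as a return value it is a map over `queries` (exact).
def minInterval (intervals : List (List Int)) (queries : List Int) : List Int :=
  let d : PySem.Dict Int Int :=
    intervals.foldl (fun d interval =>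
      let size := (PySem.List.pyGet? interval 1).getD 0 - (PySem.List.pyGet? interval 0).getD 0 + 1
      (PySem.List.pyRange ((PySem.List.pyGet? interval 0).getD 0)
          ((PySem.List.pyGet? interval 1).getD 0 + 1) 1).foldl
        (fun d i =>
          match d.get? i with
          | some v => d.insert i (min v size)
          | none => d.insert i size) d) PySem.Dict.empty
  queries.map (fun q => match d.get? q with | some v => v | none => -1)

-- ===== PORT B =====
def minInterval_alt (intervals : List (List Int)) (queries : List Int) : List Int :=
  queries.map (fun q =>
    let best : Option Int :=
      intervals.foldl (fun best iv =>
        if (PySem.List.pyGet? iv 0).getD 0 ≤ q ∧ q ≤ (PySem.List.pyGet? iv 1).getD 0 then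
          let size := (PySem.List.pyGet? iv 1).getD 0 - (PySem.List.pyGet? iv 0).getD 0 + 1
          match best with
          | none => some size
          | some v => if size < v then some size else some v
        else best) none
    match best with | some v => v | none => -1)

-- ===== PRECONDITION & SPEC =====
-- Pre_ excludes only inputs on which A raises IndexError: an interval with fewer than 2 elements.
def Pre_minInterval (intervals : List (List Int)) (queries : List Int) : Prop :=
  ∀ iv ∈ intervals, 2 ≤ iv.length
instance (intervals : List (List Int)) (queries : List Int) : Decidable (Pre_minInterval intervals queries) := by unfold Pre_minInterval; infer_instance
def pvWitness_minInterval : List (List Int) × List Int := ([[1, 4], [2, 4], [3, 6], [4, 4]], [2, 3, 4, 5])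

def Spec_minInterval (intervals : List (List Int)) (queries : List Int) (out : List Int) : Prop := out = minInterval_alt intervals queries
instance (intervals : List (List Int)) (queries : List Int) (out : List Int) : Decidable (Spec_minInterval intervals queries out) := by unfold Spec_minInterval; infer_instance

-- ===== CLAIM (what is proved, stated in full; the proofs are below) =====
def Claim_equal_minInterval : Prop := ∀ (intervals : List (List Int)) (queries : List Int), Dom_minInterval intervals queries → Pre_minInterval intervals queries → Spec_minInterval intervals queries (minInterval intervals queries)

-- ===== LEMMAS AND PROOFS =====

-- `combine o s` is what a single covering interval of size `s` does to the current optional minimum.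
def pvCombine (o : Option Int) (s : Int) : Int :=
  match o with
  | none => s
  | some v => min v s

theorem pvCombine_combine (o : Option Int) (s : Int) :
    pvCombine (some (pvCombine o s)) s = pvCombine o s := by
  cases o <;> simp [pvCombine, min_def] <;> omega

-- Effect of A's inner point loop on one dict entry.
theorem pvInnerFold_get? (pts : List Int) (size : Int) (d : PySem.Dict Int Int) (q : Int) :
    ((pts.foldl (fun d i =>
        match d.get? i with
        | some v => d.insert i (min v size)
        | none => d.insert i size) d).get? q)
      = if q ∈ pts then some (pvCombine (d.get? q) size) else d.get? q := by
  induction pts generalizing d with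
  | nil => simp
  | cons i pts ih =>
    have hstep : ∀ (d : PySem.Dict Int Int),
        ((match d.get? i with
          | some v => d.insert i (min v size)
          | none => d.insert i size).get? q)
          = if q = i then some (pvCombine (d.get? i) size) else d.get? q := by
      intro d
      cases h : d.get? i <;> simp [PySem.Dict.get?_insert, pvCombine]
    rw [List.foldl_cons, ih, hstep]
    by_cases hqi : q = i
    · subst hqi
      by_cases hq : q ∈ pts <;> simp [hq, pvCombine_combine]
    · simp [hqi, List.mem_cons]

-- Effect of A's whole dict-building loop on one entry, as a fold over the intervals.
theorem pvOuterFold_get? (ivs : List (List Int)) (d : PySem.Dict Int Int) (q : Int) :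
    ((ivs.foldl (fun d interval =>
        let size := (PySem.List.pyGet? interval 1).getD 0 - (PySem.List.pyGet? interval 0).getD 0 + 1
        (PySem.List.pyRange ((PySem.List.pyGet? interval 0).getD 0)
            ((PySem.List.pyGet? interval 1).getD 0 + 1) 1).foldl
          (fun d i =>
            match d.get? i with
            | some v => d.insert i (min v size)
            | none => d.insert i size) d) d).get? q)
      = ivs.foldl (fun o iv =>
          if (PySem.List.pyGet? iv 0).getD 0 ≤ q ∧ q ≤ (PySem.List.pyGet? iv 1).getD 0 then
            some (pvCombine o ((PySem.List.pyGet? iv 1).getD 0 - (PySem.List.pyGet? iv 0).getD 0 + 1))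
          else o) (d.get? q) := by
  induction ivs generalizing d with
  | nil => rfl
  | cons iv ivs ih =>
    rw [List.foldl_cons, List.foldl_cons, ih, pvInnerFold_get?]
    have hmem : q ∈ PySem.List.pyRange ((PySem.List.pyGet? iv 0).getD 0)
        ((PySem.List.pyGet? iv 1).getD 0 + 1) 1
        ↔ ((PySem.List.pyGet? iv 0).getD 0 ≤ q ∧ q ≤ (PySem.List.pyGet? iv 1).getD 0) := by
      rw [PySem.List.mem_pyRange_one]; omega
    by_cases hc : (PySem.List.pyGet? iv 0).getD 0 ≤ q ∧ q ≤ (PySem.List.pyGet? iv 1).getD 0 <;>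
      simp [hc, hmem]

-- B's accumulator step is `some ∘ pvCombine` on covering intervals.
theorem pvAltFold_eq (ivs : List (List Int)) (q : Int) (o : Option Int) :
    ivs.foldl (fun best iv =>
        if (PySem.List.pyGet? iv 0).getD 0 ≤ q ∧ q ≤ (PySem.List.pyGet? iv 1).getD 0 then
          let size := (PySem.List.pyGet? iv 1).getD 0 - (PySem.List.pyGet? iv 0).getD 0 + 1
          match best with
          | none => some size
          | some v => if size < v then some size else some v
        else best) o
      = ivs.foldl (fun o iv =>
          if (PySem.List.pyGet? iv 0).getD 0 ≤ q ∧ q ≤ (PySem.List.pyGet? iv 1).getD 0 then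
            some (pvCombine o ((PySem.List.pyGet? iv 1).getD 0 - (PySem.List.pyGet? iv 0).getD 0 + 1))
          else o) o := by
  induction ivs generalizing o with
  | nil => rfl
  | cons iv ivs ih =>
    rw [List.foldl_cons, List.foldl_cons, ih]
    congr 1
    by_cases hc : (PySem.List.pyGet? iv 0).getD 0 ≤ q ∧ q ≤ (PySem.List.pyGet? iv 1).getD 0
    · rw [if_pos hc, if_pos hc]
      cases o with
      | none => rfl
      | some v =>
        simp only [pvCombine]
        split_ifs with h
        · rw [min_eq_right (le_of_lt h)]
        · rw [min_eq_left (not_lt.mp h)]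
    · simp [hc]

-- ===== VERDICT (by name: the statement is the Claim_ definition above) =====
theorem minInterval_spec : Claim_equal_minInterval := by
  intro intervals queries _ _
  unfold Spec_minInterval minInterval minInterval_alt
  simp only []
  apply List.map_congr_left
  intro q _
  rw [pvOuterFold_get?, PySem.Dict.get?_empty, ← pvAltFold_eq]
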